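-- pv_equiv track=rewrite | github.com/hamza-m-farooqi/pygit | src/commands.py | _match_paths
-- ===== SOURCE A (Python) =====
-- def _match_paths(pathspecs: list[str], candidates: set[str]) -> set[str]:
--     matched: set[str] = set()
--     for spec in pathspecs:
--         if spec in candidates:
--             matched.add(spec)
--             continue
--         prefix = f"{spec}/"
--         for candidate in candidates:
--             if candidate.startswith(prefix):
--                 matched.add(candidate)
--     return matched
-- ===== SOURCE B (Python) =====
-- def _match_paths(pathspecs: list[str], candidates: set[str]) -> set[str]:
--     # Build a directory-prefix index once: for every '/' in a candidate,
--     # map the prefix before it to that candidate. Each spec then hits by lookup.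
--     index: dict[str, list[str]] = {}
--     for c in candidates:
--         for i, ch in enumerate(c):
--             if ch == "/":
--                 index.setdefault(c[:i], []).append(c)
--     matched: set[str] = set()
--     for spec in pathspecs:
--         if spec in candidates:
--             matched.add(spec)
--         else:
--             matched.update(index.get(spec, []))
--     return matched
-- ===== Notes on version B (the rewrite author's own statement) =====
-- stated objective: faster
-- what changed: Instead of scanning every candidate for each pathspec, B builds a dictionary once mapping each directory prefix (text before a '/') of a candidate to the candidates under it, so each non-exact spec becomes a single lookup.
import Mathlib
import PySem

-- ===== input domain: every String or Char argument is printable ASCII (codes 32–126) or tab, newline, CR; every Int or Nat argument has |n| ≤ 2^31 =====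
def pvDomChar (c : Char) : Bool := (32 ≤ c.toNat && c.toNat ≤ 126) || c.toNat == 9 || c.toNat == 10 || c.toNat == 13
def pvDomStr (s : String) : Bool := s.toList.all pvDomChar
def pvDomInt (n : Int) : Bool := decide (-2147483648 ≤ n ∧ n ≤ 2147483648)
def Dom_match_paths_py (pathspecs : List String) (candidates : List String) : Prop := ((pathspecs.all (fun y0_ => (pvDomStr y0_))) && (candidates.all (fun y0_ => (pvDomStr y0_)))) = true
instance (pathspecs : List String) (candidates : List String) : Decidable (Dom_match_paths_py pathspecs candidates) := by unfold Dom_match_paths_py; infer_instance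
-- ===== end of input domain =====

-- B replaces A's per-spec scan of all candidates by a directory-prefix index built once
-- (dict: prefix before each '/' ↦ candidates), so each spec is a lookup (objective: faster).

-- ===== PORT A =====
-- matched = set(); for spec: if spec in candidates: add spec; else scan candidates for prefix spec+"/"
def match_paths_py (pathspecs : List String) (candidates : List String) : List String :=
  pathspecs.foldl
    (fun matched spec =>
      if candidates.contains spec then PySem.Set.add matched spec
      else
        candidates.foldl
          (fun m candidate =>
            if PySem.Chars.startswith candidate.toList (spec.toList ++ ['/']) then
              PySem.Set.add m candidate
            else m)
          matched)
    PySem.Set.empty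

-- ===== PORT B =====
-- index.setdefault(c[:i], []).append(c) for every i with c[i] == '/'
def pvIndexStep (d : PySem.Dict (List Char) (List String)) (c : String) :
    PySem.Dict (List Char) (List String) :=
  (PySem.List.enumerate c.toList 0).foldl
    (fun d p =>
      if p.2 = '/' then d.modify (PySem.List.slice c.toList none (some p.1)) [] (· ++ [c])
      else d)
    d

def match_paths_py_alt (pathspecs : List String) (candidates : List String) : List String :=
  let index := candidates.foldl pvIndexStep PySem.Dict.empty
  pathspecs.foldl
    (fun matched spec =>
      if candidates.contains spec then PySem.Set.add matched spec
      else PySem.Set.update matched (index.getD spec.toList []))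
    PySem.Set.empty

-- ===== PRECONDITION & SPEC =====
def Spec_match_paths_py (pathspecs : List String) (candidates : List String) (out : List String) : Prop := out = match_paths_py_alt pathspecs candidates
instance (pathspecs : List String) (candidates : List String) (out : List String) : Decidable (Spec_match_paths_py pathspecs candidates out) := by unfold Spec_match_paths_py; infer_instance

-- ===== CLAIM (what is proved, stated in full; the proofs are below) =====
def Claim_equal_match_paths_py : Prop := ∀ (pathspecs : List String) (candidates : List String), Dom_match_paths_py pathspecs candidates → Spec_match_paths_py pathspecs candidates (match_paths_py pathspecs candidates)

-- ===== LEMMAS AND PROOFS =====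

-- A fold over pairs none of which hits key k leaves the entry at k unchanged.
lemma pv_fold_untouched (c : String) (k : List Char) (l : List (Int × Char))
    (d : PySem.Dict (List Char) (List String))
    (h : ∀ p ∈ l, p.2 = '/' → PySem.List.slice c.toList none (some p.1) ≠ k) :
    ((l.foldl
        (fun d p =>
          if p.2 = '/' then d.modify (PySem.List.slice c.toList none (some p.1)) [] (· ++ [c])
          else d) d).getD k []) = d.getD k [] := by
  induction l generalizing d with
  | nil => rfl
  | cons p l ih =>
    simp only [List.foldl_cons]
    rw [ih _ (fun q hq => h q (List.mem_cons_of_mem _ hq))]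
    split_ifs with hs
    · rw [PySem.Dict.getD_modify_of_ne _ _ _ (Ne.symm (h p (List.mem_cons_self ..) hs))]
    · rfl

-- One candidate's inner loop appends c to the entry at k exactly when c starts with k ++ "/".
lemma pv_indexStep_getD (c : String) (k : List Char) (d : PySem.Dict (List Char) (List String)) :
    (pvIndexStep d c).getD k [] =
      d.getD k [] ++ (if PySem.Chars.startswith c.toList (k ++ ['/']) then [c] else []) := by
  unfold pvIndexStep
  by_cases hsw : PySem.Chars.startswith c.toList (k ++ ['/'])
  · obtain ⟨rest, hrest⟩ := (PySem.Chars.startswith_iff _ _).1 hsw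
    simp only [hsw, if_true]
    have hcs : c.toList = k ++ '/' :: rest := by
      rw [← hrest]; simp
    rw [show PySem.List.enumerate c.toList 0
          = PySem.List.enumerate k 0 ++ ((0 + (k.length : Int), '/')
              :: PySem.List.enumerate rest (0 + (k.length : Int) + 1)) by
        rw [hcs, PySem.List.enumerate_append, PySem.List.enumerate_cons]]
    rw [List.foldl_append, List.foldl_cons]
    dsimp only
    have h1 : ∀ p ∈ PySem.List.enumerate k 0, p.2 = '/' →
        PySem.List.slice c.toList none (some p.1) ≠ k := by
      intro p hp _
      obtain ⟨j, hj, rfl⟩ := (PySem.List.mem_enumerate_iff _ _ _).1 hp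
      dsimp only
      have hsl := PySem.List.slice_to c.toList (b := 0 + (j : Int)) (by omega)
      rw [hsl]
      intro hk
      have : (List.take (((0 : Int) + (j : Int)).toNat) c.toList).length = j := by
        simp [hcs]; omega
      rw [hk] at this; omega
    rw [if_pos rfl]
    have hkey : PySem.List.slice c.toList none (some ((0 : Int) + (k.length : Int))) = k := by
      have hsl := PySem.List.slice_to c.toList (b := 0 + (k.length : Int)) (by omega)
      rw [hsl]
      simp [hcs]
    rw [pv_fold_untouched, hkey, PySem.Dict.getD_modify_self,
      pv_fold_untouched c k _ d h1]
    intro p hp _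
    obtain ⟨j, hj, rfl⟩ := (PySem.List.mem_enumerate_iff _ _ _).1 hp
    dsimp only
    have hsl := PySem.List.slice_to c.toList (b := 0 + (k.length : Int) + 1 + (j : Int)) (by omega)
    rw [hsl]
    intro hk
    have : (List.take (((0 : Int) + (k.length : Int) + 1 + (j : Int)).toNat) c.toList).length
        = min (k.length + 1 + j) c.toList.length := by
      rw [List.length_take]; congr 1; omega
    rw [hk] at this
    simp [hcs] at this
    omega
  · rw [if_neg hsw, List.append_nil]
    apply pv_fold_untouched
    intro p hp hslash
    obtain ⟨j, hj, rfl⟩ := (PySem.List.mem_enumerate_iff _ _ _).1 hp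
    dsimp only at hslash ⊢
    have hsl := PySem.List.slice_to c.toList (b := 0 + (j : Int)) (by omega)
    rw [hsl]
    intro hk
    have hjn : (((0 : Int) + (j : Int)).toNat) = j := by omega
    rw [hjn] at hk
    apply hsw
    rw [PySem.Chars.startswith_iff]
    have htake : c.toList.take (j + 1) = k ++ ['/'] := by
      rw [List.take_add_one, hk, List.getElem?_eq_getElem hj, hslash]
      rfl
    rw [← htake]
    exact List.take_prefix _ _

-- The whole index at key k is the filtered candidate list.
lemma pv_index_getD (cands : List String) (k : List Char)
    (d : PySem.Dict (List Char) (List String)) :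
    ((cands.foldl pvIndexStep d).getD k []) =
      d.getD k [] ++ cands.filter (fun c => PySem.Chars.startswith c.toList (k ++ ['/'])) := by
  induction cands generalizing d with
  | nil => simp
  | cons c cands ih =>
    simp only [List.foldl_cons, List.filter_cons]
    rw [ih, pv_indexStep_getD]
    split_ifs with h <;> simp
-- A's guarded fold is the fold of Set.add over the filtered list.
lemma pv_filter_fold (P : String → Bool) (l : List String) (m : List String) :
    (l.foldl (fun m c => if P c then PySem.Set.add m c else m) m) =
      ((l.filter P).foldl PySem.Set.add m) := by
  induction l generalizing m with
  | nil => rfl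
  | cons c l ih =>
    simp only [List.foldl_cons, List.filter_cons]
    split_ifs with h <;> simp [ih]

-- ===== VERDICT (by name: the statement is the Claim_ definition above) =====
theorem match_paths_py_spec : Claim_equal_match_paths_py := by
  intro pathspecs candidates _
  show match_paths_py pathspecs candidates = match_paths_py_alt pathspecs candidates
  unfold match_paths_py match_paths_py_alt
  simp only []
  congr 1
  funext matched spec
  split_ifs with h
  · rfl
  · rw [pv_filter_fold, pv_index_getD, PySem.Dict.getD_empty, List.nil_append]
    rfl
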